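-- pv_equiv track=rewrite | github.com/currentsuspect/nomad-muse-trainer | src/nomad_format.py | _matches_template
-- ===== SOURCE A (Python) =====
-- from typing import Dict, List, Optional, Tuple, Any
--
-- def _matches_template(pitch_classes: List[int], template: Tuple[int, ...]) -> bool:
--     """Check if pitch classes match a chord template."""
--     if len(pitch_classes) != len(template):
--         return False
--
--     # Try all rotations (inversions)
--     for i in range(len(template)):
--         rotated_template = tuple((template[j] - template[0]) % 12 for j in range(len(template)))
--         if pitch_classes == sorted(rotated_template):
--             return True
--
--         # Rotate template
--         template = tuple((template[j] - template[1]) % 12 for j in range(len(template)))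
--
--     return False
-- ===== SOURCE B (Python) =====
-- from typing import List, Tuple
--
-- def _matches_template(pitch_classes: List[int], template: Tuple[int, ...]) -> bool:
--     """Check if pitch classes match a chord template (root-position normalization).
--
--     A's rotation loop always compares against the same normalized list, so one
--     comparison suffices."""
--     if len(pitch_classes) != len(template):
--         return False
--     if not template:
--         return False
--     root = template[0]
--     return pitch_classes == sorted((t - root) % 12 for t in template)
-- ===== Notes on version B (the rewrite author's own statement) =====
-- stated objective: faster
-- what changed: A's rotation loop is dropped entirely: each iteration re-normalizes to the identical sorted((t - template[0]) % 12) list, so B performs that single normalization and one comparison instead of len(template) rotate-and-compare passes.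
-- crash fix: On inputs where both lists have length 1 and the pitch class is not [0], A raises IndexError (template[1] during rotation) while B returns False. — e.g. on _matches_template([1], [5]): A raises IndexError, B returns false
import Mathlib
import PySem

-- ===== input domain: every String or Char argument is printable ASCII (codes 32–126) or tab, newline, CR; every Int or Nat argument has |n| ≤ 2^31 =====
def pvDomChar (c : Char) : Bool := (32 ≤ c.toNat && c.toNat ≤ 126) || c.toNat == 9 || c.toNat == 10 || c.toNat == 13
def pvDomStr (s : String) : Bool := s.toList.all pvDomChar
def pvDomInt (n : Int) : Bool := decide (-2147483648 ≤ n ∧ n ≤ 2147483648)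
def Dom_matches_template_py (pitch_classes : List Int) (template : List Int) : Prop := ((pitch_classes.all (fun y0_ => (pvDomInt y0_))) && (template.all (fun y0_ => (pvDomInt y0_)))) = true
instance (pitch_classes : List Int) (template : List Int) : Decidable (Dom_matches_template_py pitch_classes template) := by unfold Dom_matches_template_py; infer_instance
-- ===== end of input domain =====

-- B drops A's rotation loop: every iteration of A compares against the same
-- sorted root-position normalization, so one comparison suffices (objective: simpler).

-- ===== PORT A =====
-- the loop 'for i in range(len(template))': counts down n, carrying the rotated template
def pvALoop (pc : List Int) : Nat → List Int → Bool
  | 0, _ => false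
  | n + 1, tmpl =>
    let rotated := tmpl.map (fun x => PySem.Int.mod (x - tmpl.headD 0) 12)
    if pc = PySem.List.sorted rotated (fun x => x) then true
    else pvALoop pc n (tmpl.map (fun x => PySem.Int.mod (x - (PySem.List.pyGet? tmpl 1).getD 0) 12))
    -- template[1] raises IndexError in Python when len(template) = 1; those inputs are outside Pre_

def matches_template_py (pitch_classes : List Int) (template : List Int) : Bool :=
  if pitch_classes.length ≠ template.length then false
  else pvALoop pitch_classes template.length template

-- ===== PORT B =====
def matches_template_py_alt (pitch_classes : List Int) (template : List Int) : Bool :=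
  if pitch_classes.length ≠ template.length then false
  else
    match template with
    | [] => false
    | root :: _ =>
      decide (pitch_classes =
        PySem.List.sorted (template.map (fun x => PySem.Int.mod (x - root) 12)) (fun x => x))

-- ===== PRECONDITION & SPEC =====
-- Pre_ excludes exactly the inputs where Python A raises IndexError: both lists of
-- length 1 with pitch_classes ≠ [0] (template[1] is evaluated during the rotation).
def Pre_matches_template_py (pitch_classes : List Int) (template : List Int) : Prop :=
  ¬ (pitch_classes.length = 1 ∧ template.length = 1 ∧ pitch_classes ≠ [0])
instance (pitch_classes : List Int) (template : List Int) : Decidable (Pre_matches_template_py pitch_classes template) := by unfold Pre_matches_template_py; infer_instance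
def pvWitness_matches_template_py : List Int × List Int := ([0, 4, 7], [0, 4, 7])

-- On inputs where both lists have length 1 and the pitch class is not [0], A raises
-- IndexError (template[1] during rotation) while B returns False.
def Raises_matches_template_py (pitch_classes : List Int) (template : List Int) : Prop :=
  pitch_classes.length = 1 ∧ template.length = 1 ∧ pitch_classes ≠ [0]
instance (pitch_classes : List Int) (template : List Int) : Decidable (Raises_matches_template_py pitch_classes template) := by unfold Raises_matches_template_py; infer_instance
def pvRaiseWitness_matches_template_py : List Int × List Int := ([1], [5])
def pvRaiseWitnessOut_matches_template_py : Bool := false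

def Spec_matches_template_py (pitch_classes : List Int) (template : List Int) (out : Bool) : Prop := out = matches_template_py_alt pitch_classes template
instance (pitch_classes : List Int) (template : List Int) (out : Bool) : Decidable (Spec_matches_template_py pitch_classes template out) := by unfold Spec_matches_template_py; infer_instance

-- ===== CLAIM (what is proved, stated in full; the proofs are below) =====
def Claim_equal_matches_template_py : Prop := ∀ (pitch_classes : List Int) (template : List Int), Dom_matches_template_py pitch_classes template → Pre_matches_template_py pitch_classes template → Spec_matches_template_py pitch_classes template (matches_template_py pitch_classes template)
def Claim_raises_matches_template_py : Prop := (∀ (pitch_classes : List Int) (template : List Int), Dom_matches_template_py pitch_classes template → Raises_matches_template_py pitch_classes template → ¬ Pre_matches_template_py pitch_classes template) ∧ (Dom_matches_template_py (pvRaiseWitness_matches_template_py.1) (pvRaiseWitness_matches_template_py.2) ∧ Raises_matches_template_py (pvRaiseWitness_matches_template_py.1) (pvRaiseWitness_matches_template_py.2) ∧ matches_template_py_alt (pvRaiseWitness_matches_template_py.1) (pvRaiseWitness_matches_template_py.2) = pvRaiseWitnessOut_matches_template_py)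

-- ===== LEMMAS AND PROOFS =====

-- ((a - k) % 12 - (h - k) % 12) % 12 = (a - h) % 12
lemma pv_mod_shift (a h k : Int) :
    PySem.Int.mod (PySem.Int.mod (a - k) 12 - PySem.Int.mod (h - k) 12) 12
      = PySem.Int.mod (a - h) 12 := by
  simp only [PySem.Int.mod_eq_emod_of_pos (by norm_num : (0:Int) < 12)]
  omega

-- rotating the template does not change its root-position normalization
lemma pv_norm_shift (h : Int) (rest : List Int) (k : Int) :
    ((h :: rest).map (fun x => PySem.Int.mod (x - k) 12)).map
        (fun x => PySem.Int.mod (x - ((h :: rest).map (fun x => PySem.Int.mod (x - k) 12)).headD 0) 12)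
      = (h :: rest).map (fun x => PySem.Int.mod (x - (h :: rest).headD 0) 12) := by
  simp only [List.map_cons, List.headD_cons, List.map_map]
  have : ((fun x => PySem.Int.mod (x - PySem.Int.mod (h - k) 12) 12) ∘ fun x => PySem.Int.mod (x - k) 12)
      = fun x => PySem.Int.mod (x - h) 12 := by
    funext x
    exact pv_mod_shift x h k
  rw [this, pv_mod_shift h h k]

lemma pv_loop_eq (pc : List Int) (n : Nat) (h : Int) (rest : List Int) :
    pvALoop pc (n + 1) (h :: rest)
      = decide (pc = PySem.List.sorted ((h :: rest).map (fun x => PySem.Int.mod (x - (h :: rest).headD 0) 12)) (fun x => x)) := by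
  induction n generalizing h rest with
  | zero =>
    by_cases hp : pc = PySem.List.sorted ((h :: rest).map (fun x => PySem.Int.mod (x - (h :: rest).headD 0) 12)) (fun x => x) <;>
      simp [pvALoop, hp]
  | succ m ih =>
    by_cases hp : pc = PySem.List.sorted ((h :: rest).map (fun x => PySem.Int.mod (x - (h :: rest).headD 0) 12)) (fun x => x)
    · simp [pvALoop, hp]
    · have step : pvALoop pc (m + 1 + 1) (h :: rest)
          = if pc = PySem.List.sorted ((h :: rest).map (fun x => PySem.Int.mod (x - (h :: rest).headD 0) 12)) (fun x => x) then true
            else pvALoop pc (m + 1) ((h :: rest).map (fun x => PySem.Int.mod (x - (PySem.List.pyGet? (h :: rest) 1).getD 0) 12)) := rfl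
      rw [step, if_neg hp, List.map_cons,
        ih (PySem.Int.mod (h - (PySem.List.pyGet? (h :: rest) 1).getD 0) 12)
          (rest.map (fun x => PySem.Int.mod (x - (PySem.List.pyGet? (h :: rest) 1).getD 0) 12))]
      have hn := pv_norm_shift h rest ((PySem.List.pyGet? (h :: rest) 1).getD 0)
      simp only [List.map_cons] at hn ⊢
      simp only [hn]
      rfl

-- ===== VERDICT (by name: the statement is the Claim_ definition above) =====
theorem matches_template_py_spec : Claim_equal_matches_template_py := by
  intro pc t _ _
  unfold Spec_matches_template_py matches_template_py matches_template_py_alt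
  by_cases hl : pc.length = t.length
  · simp only [hl, ne_eq, not_true_eq_false, if_false]
    cases t with
    | nil => simp [pvALoop]
    | cons h rest =>
      rw [show (h :: rest).length = rest.length + 1 from rfl, pv_loop_eq]
      simp
  · simp [hl]

theorem matches_template_py_raises : Claim_raises_matches_template_py := by
  unfold Claim_raises_matches_template_py
  constructor
  · intro pc t _ hr hpre
    exact hpre hr
  · decide

-- self-check: the raise-witness indeed lies outside Pre_ (derived from the raises theorem)
theorem pvRaiseWitness_ok :
    ¬ Pre_matches_template_py pvRaiseWitness_matches_template_py.1 pvRaiseWitness_matches_template_py.2 :=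
  matches_template_py_raises.1 _ _ matches_template_py_raises.2.1 matches_template_py_raises.2.2.1
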